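-- pv_equiv track=rewrite | github.com/primaryNK/-python-programming | discrod_bot.py | reconstruct_text
-- ===== SOURCE A (Python) =====
-- def reconstruct_text(ngrams):
--     # 시작점 (n-gram 첫요소 시작)
--     start = ngrams[0][0]
--     sentence = [start]
--
--     used_ngrams = []
--
--     # n-gram으로 문장구성
--     for i in range(len(ngrams)):
--         for ngram in ngrams:
--             if ngram[0] == sentence[-1] and ngram not in used_ngrams:
--                 sentence.append(ngram[1])
--                 used_ngrams.append(ngram)
--                 break
--
--     return sentence
-- ===== SOURCE B (Python) =====
-- def reconstruct_text(ngrams):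
--     # Index distinct ngrams once: first token -> queue of second tokens
--     # (first-occurrence order); then chain greedily from the start token.
--     index = {}
--     seen = set()
--     for g in ngrams:
--         if g not in seen:
--             seen.add(g)
--             index.setdefault(g[0], []).append(g[1])
--     cur = ngrams[0][0]
--     sentence = [cur]
--     while True:
--         lst = index.get(cur)
--         if not lst:
--             break
--         cur = lst.pop(0)
--         sentence.append(cur)
--     return sentence
-- ===== Notes on version B (the rewrite author's own statement) =====
-- stated objective: faster
-- what changed: B builds a dict from first token to the queue of distinct successors in one pass and then chains by popping the earliest unused match, replacing A's per-step rescan of ngrams with a linear membership test on used_ngrams.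
import Mathlib
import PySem

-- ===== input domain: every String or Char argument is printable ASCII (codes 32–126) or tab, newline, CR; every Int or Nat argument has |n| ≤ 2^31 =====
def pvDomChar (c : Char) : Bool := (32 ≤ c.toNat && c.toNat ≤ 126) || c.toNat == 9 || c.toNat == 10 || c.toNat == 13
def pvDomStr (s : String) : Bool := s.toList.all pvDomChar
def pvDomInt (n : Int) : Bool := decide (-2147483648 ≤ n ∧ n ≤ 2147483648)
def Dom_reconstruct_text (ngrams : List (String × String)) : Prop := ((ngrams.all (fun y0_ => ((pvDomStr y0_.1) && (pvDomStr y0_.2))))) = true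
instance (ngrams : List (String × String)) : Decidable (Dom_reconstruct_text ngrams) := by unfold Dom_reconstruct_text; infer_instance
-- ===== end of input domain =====

-- B builds a dict indexing the distinct ngrams by first token once and chains by popping
-- the earliest unused successor, instead of A's rescans of ngrams and of used_ngrams (measured faster).

-- ===== PORT A =====
-- inner 'for ngram in ngrams: if … : …; break' — first ngram matching the current last token and not yet used
def fUn (t : String) (used : List (String × String)) : List (String × String) → Option (String × String)
  | [] => none
  | g :: rest => if g.1 = t ∧ g ∉ used then some g else fUn t used rest

-- one iteration of A's outer loop on the state (sentence, used_ngrams)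
def aStep (ngrams : List (String × String)) (st : List String × List (String × String)) :
    List String × List (String × String) :=
  match fUn (st.1.getLast?.getD "") st.2 ngrams with   -- sentence[-1]; sentence is never empty
  | some g => (st.1 ++ [g.2], st.2 ++ [g])
  | none => st

-- 'for i in range(len(ngrams))'
def aLoop (ngrams : List (String × String)) : Nat → (List String × List (String × String)) → (List String × List (String × String))
  | 0, st => st
  | k + 1, st => aLoop ngrams k (aStep ngrams st)

def reconstruct_text (ngrams : List (String × String)) : List String :=
  match ngrams with
  | [] => []                                   -- ngrams[0] raises IndexError: outside Pre_
  | (start, _) :: _ => (aLoop ngrams ngrams.length ([start], [])).1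

-- ===== PORT B =====
-- first pass of Source B: seen = set(); index.setdefault(g[0], []).append(g[1]) for unseen g
def bIndex : List (String × String) → PySem.Set (String × String) → PySem.Dict String (List String) → PySem.Dict String (List String)
  | [], _, idx => idx
  | g :: rest, seen, idx =>
    if g ∈ seen then bIndex rest seen idx
    else bIndex rest (PySem.Set.add seen g) (idx.insert g.1 (idx.getD g.1 [] ++ [g.2]))

-- the while loop: pop the front of index[cur], append, move on; fuel bounds the (finite) loop
def bChain : Nat → PySem.Dict String (List String) → String → List String
  | 0, _, _ => []
  | fuel + 1, idx, cur =>
    match idx.getD cur [] with                 -- 'lst = index.get(cur); if not lst: break'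
    | [] => []
    | b :: rest => b :: bChain fuel (idx.insert cur rest) b   -- 'cur = lst.pop(0)'

def reconstruct_text_alt (ngrams : List (String × String)) : List String :=
  match ngrams with
  | [] => []                                   -- ngrams[0] raises IndexError: outside Pre_
  | (start, _) :: _ =>
    start :: bChain ngrams.length (bIndex ngrams PySem.Set.empty PySem.Dict.empty) start

-- ===== PRECONDITION & SPEC =====
-- A evaluates ngrams[0] first: on the empty list it raises IndexError, so Pre_ excludes only [].
def Pre_reconstruct_text (ngrams : List (String × String)) : Prop := ngrams ≠ []
instance (ngrams : List (String × String)) : Decidable (Pre_reconstruct_text ngrams) := by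
  unfold Pre_reconstruct_text; infer_instance

def pvWitness_reconstruct_text : (List (String × String)) := [("a", "b"), ("b", "c")]

def Spec_reconstruct_text (ngrams : List (String × String)) (out : List String) : Prop := out = reconstruct_text_alt ngrams
instance (ngrams : List (String × String)) (out : List String) : Decidable (Spec_reconstruct_text ngrams out) := by unfold Spec_reconstruct_text; infer_instance

-- ===== CLAIM (what is proved, stated in full; the proofs are below) =====
def Claim_equal_reconstruct_text : Prop := ∀ (ngrams : List (String × String)), Dom_reconstruct_text ngrams → Pre_reconstruct_text ngrams → Spec_reconstruct_text ngrams (reconstruct_text ngrams)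

-- ===== LEMMAS AND PROOFS =====

-- ghost dedup: the distinct ngrams in first-occurrence order, given already-seen set
def ddp : List (String × String) → PySem.Set (String × String) → List (String × String)
  | [], _ => []
  | g :: rest, seen => if g ∈ seen then ddp rest seen else g :: ddp rest (PySem.Set.add seen g)

-- the second components of the unused distinct ngrams with first component t, in order
def fm (t : String) (used : List (String × String)) (l : List (String × String)) : List String :=
  l.filterMap (fun g => if g.1 = t ∧ g ∉ used then some g.2 else none)

-- the simulation invariant between A's used_ngrams and B's residual index
def inv (ngrams used : List (String × String)) (idx : PySem.Dict String (List String)) : Prop :=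
  ∀ a, idx.getD a [] = fm a used (ddp ngrams PySem.Set.empty)

theorem fUn_eq_fm_head (t : String) (used : List (String × String)) (l : List (String × String)) :
    fUn t used l = (fm t used l).head?.map (fun b => (t, b)) := by
  induction l with
  | nil => rfl
  | cons g rest ih =>
    by_cases h : g.1 = t ∧ g ∉ used
    · have e1 : fUn t used (g :: rest) = some g := by simp only [fUn]; rw [if_pos h]
      have e2 : fm t used (g :: rest) = g.2 :: fm t used rest := by
        simp only [fm, List.filterMap_cons]; rw [if_pos h]
      rw [e1, e2, List.head?_cons, Option.map_some]
      obtain ⟨g1, g2⟩ := g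
      obtain ⟨h1, -⟩ := h
      simp only at h1
      rw [h1]
    · have e1 : fUn t used (g :: rest) = fUn t used rest := by simp only [fUn]; rw [if_neg h]
      have e2 : fm t used (g :: rest) = fm t used rest := by
        simp only [fm, List.filterMap_cons]; rw [if_neg h]
      rw [e1, e2, ih]

theorem fUn_filter_skip (t : String) (used : List (String × String)) (g : String × String)
    (hg : ¬ (g.1 = t ∧ g ∉ used)) (l : List (String × String)) (s : List (String × String)) :
    fUn t used (l.filter (fun x => decide (x ∉ s ∧ x ≠ g))) =
    fUn t used (l.filter (fun x => decide (x ∉ s))) := by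
  induction l with
  | nil => rfl
  | cons x rest ih =>
    simp only [List.filter_cons]
    by_cases hs : x ∈ s
    · rw [if_neg (by simp [hs]), if_neg (by simp [hs])]
      exact ih
    · by_cases hx : x = g
      · subst hx
        rw [if_neg (by simp), if_pos (by simp [hs])]
        have e : fUn t used (x :: rest.filter (fun y => decide (y ∉ s))) =
            fUn t used (rest.filter (fun y => decide (y ∉ s))) := by
          simp only [fUn]; rw [if_neg hg]
        rw [e]
        exact ih
      · rw [if_pos (by simp [hs, hx]), if_pos (by simp [hs])]
        by_cases hc : x.1 = t ∧ x ∉ used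
        · simp only [fUn]; rw [if_pos hc, if_pos hc]
        · simp only [fUn]; rw [if_neg hc, if_neg hc]
          exact ih

theorem fUn_ddp (t : String) (used : List (String × String)) :
    ∀ (l : List (String × String)) (seen : PySem.Set (String × String)),
      fUn t used (ddp l seen) = fUn t used (l.filter (fun x => decide (x ∉ seen))) := by
  intro l
  induction l with
  | nil => intro seen; rfl
  | cons g rest ih =>
    intro seen
    by_cases hs : g ∈ seen
    · have e1 : ddp (g :: rest) seen = ddp rest seen := by simp only [ddp]; rw [if_pos hs]
      rw [e1, List.filter_cons, if_neg (by simp [hs]), ih]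
    · have e1 : ddp (g :: rest) seen = g :: ddp rest (PySem.Set.add seen g) := by
        simp only [ddp]; rw [if_neg hs]
      rw [e1, List.filter_cons, if_pos (by simp [hs])]
      by_cases hc : g.1 = t ∧ g ∉ used
      · simp only [fUn]; rw [if_pos hc, if_pos hc]
      · simp only [fUn]; rw [if_neg hc, if_neg hc, ih]
        have hfilter : rest.filter (fun x => decide (x ∉ PySem.Set.add seen g)) =
            rest.filter (fun x => decide (x ∉ seen ∧ x ≠ g)) := by
          apply List.filter_congr
          intro x _
          simp [PySem.Set.mem_add, not_or]
        rw [hfilter, fUn_filter_skip t used g hc rest seen]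

theorem fUn_ddp_empty (t : String) (used l : List (String × String)) :
    fUn t used (ddp l PySem.Set.empty) = fUn t used l := by
  rw [fUn_ddp]
  have : l.filter (fun x => decide (x ∉ PySem.Set.empty)) = l := by
    apply List.filter_eq_self.mpr
    intro x _
    simp [PySem.Set.empty]
  rw [this]

theorem ddp_nodup_notseen : ∀ (l : List (String × String)) (seen : PySem.Set (String × String)),
    (ddp l seen).Nodup ∧ ∀ x ∈ ddp l seen, x ∉ seen := by
  intro l
  induction l with
  | nil => intro seen; simp [ddp]
  | cons g rest ih =>
    intro seen
    by_cases hs : g ∈ seen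
    · have e1 : ddp (g :: rest) seen = ddp rest seen := by simp only [ddp]; rw [if_pos hs]
      rw [e1]; exact ih seen
    · have e1 : ddp (g :: rest) seen = g :: ddp rest (PySem.Set.add seen g) := by
        simp only [ddp]; rw [if_neg hs]
      obtain ⟨hnd, hns⟩ := ih (PySem.Set.add seen g)
      rw [e1]
      constructor
      · rw [List.nodup_cons]
        refine ⟨fun hmem => ?_, hnd⟩
        have := hns g hmem
        simp [PySem.Set.mem_add] at this
      · intro x hx
        rcases List.mem_cons.mp hx with rfl | hx
        · exact hs
        · have := hns x hx
          simp [PySem.Set.mem_add, not_or] at this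
          exact this.1

theorem bIndex_getD (a : String) : ∀ (l : List (String × String)) (seen : PySem.Set (String × String))
    (idx : PySem.Dict String (List String)),
    (bIndex l seen idx).getD a [] = idx.getD a [] ++ fm a [] (ddp l seen) := by
  intro l
  induction l with
  | nil => intro seen idx; simp [bIndex, ddp, fm]
  | cons g rest ih =>
    intro seen idx
    by_cases hs : g ∈ seen
    · have e1 : bIndex (g :: rest) seen idx = bIndex rest seen idx := by
        simp only [bIndex]; rw [if_pos hs]
      have e2 : ddp (g :: rest) seen = ddp rest seen := by simp only [ddp]; rw [if_pos hs]
      rw [e1, e2, ih]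
    · have e1 : bIndex (g :: rest) seen idx =
          bIndex rest (PySem.Set.add seen g) (idx.insert g.1 (idx.getD g.1 [] ++ [g.2])) := by
        simp only [bIndex]; rw [if_neg hs]
      have e2 : ddp (g :: rest) seen = g :: ddp rest (PySem.Set.add seen g) := by
        simp only [ddp]; rw [if_neg hs]
      rw [e1, e2, ih]
      have e3 : fm a [] (g :: ddp rest (PySem.Set.add seen g)) =
          (if g.1 = a then [g.2] else []) ++ fm a [] (ddp rest (PySem.Set.add seen g)) := by
        simp only [fm, List.filterMap_cons]
        by_cases hk : g.1 = a
        · rw [if_pos (by simp [hk]), if_pos hk]; rfl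
        · rw [if_neg (by simp [hk]), if_neg hk]; rfl
      rw [e3, PySem.Dict.getD_insert]
      by_cases hk : g.1 = a
      · rw [if_pos hk.symm, hk]
        simp
      · rw [if_neg (fun h => hk h.symm), if_neg hk]
        simp

theorem inv_init (ngrams : List (String × String)) :
    inv ngrams [] (bIndex ngrams PySem.Set.empty PySem.Dict.empty) := by
  intro a
  rw [bIndex_getD]
  simp

theorem fm_split (a : String) (used : List (String × String)) :
    ∀ (l : List (String × String)) (b : String) (rest : List String),
      fm a used l = b :: rest →
      ∃ l1 l2, l = l1 ++ (a, b) :: l2 ∧ fm a used l1 = [] ∧ (a, b) ∉ used ∧ fm a used l2 = rest := by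
  intro l
  induction l with
  | nil => intro b rest h; simp [fm] at h
  | cons g tail ih =>
    intro b rest h
    by_cases hc : g.1 = a ∧ g ∉ used
    · have e : fm a used (g :: tail) = g.2 :: fm a used tail := by
        simp only [fm, List.filterMap_cons]; rw [if_pos hc]
      rw [e] at h
      obtain ⟨hb, hrest⟩ := List.cons_eq_cons.mp h
      obtain ⟨g1, g2⟩ := g
      obtain ⟨h1, h2⟩ := hc
      simp only at h1 hb
      subst h1; subst hb
      exact ⟨[], tail, rfl, rfl, h2, hrest⟩
    · have e : fm a used (g :: tail) = fm a used tail := by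
        simp only [fm, List.filterMap_cons]; rw [if_neg hc]
      rw [e] at h
      obtain ⟨l1, l2, hl, h1, h2, h3⟩ := ih b rest h
      refine ⟨g :: l1, l2, by rw [hl]; rfl, ?_, h2, h3⟩
      simp only [fm, List.filterMap_cons]
      rw [if_neg hc]
      exact h1

theorem fm_nil_grow (a : String) (used : List (String × String)) (x : String × String)
    (l : List (String × String)) (h : fm a used l = []) : fm a (used ++ [x]) l = [] := by
  unfold fm at h ⊢
  rw [List.filterMap_eq_nil_iff] at h ⊢
  intro g hg
  have hgn := h g hg
  by_cases hc : g.1 = a ∧ g ∉ used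
  · rw [if_pos hc] at hgn; exact absurd hgn (by simp)
  · rw [if_neg (fun hc2 => hc ⟨hc2.1, fun hm => hc2.2 (by simp [hm])⟩)]

theorem fm_notmem (a : String) (used : List (String × String)) (x : String × String)
    (l : List (String × String)) (h : x ∉ l) : fm a (used ++ [x]) l = fm a used l := by
  unfold fm
  apply List.filterMap_congr
  intro g hg
  have hne : g ≠ x := fun he => h (he ▸ hg)
  simp [hne]

theorem fm_nekey (a : String) (used : List (String × String)) (x : String × String)
    (l : List (String × String)) (h : x.1 ≠ a) : fm a (used ++ [x]) l = fm a used l := by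
  unfold fm
  apply List.filterMap_congr
  intro g hg
  by_cases h1 : g.1 = a
  · have hne : g ≠ x := fun he => h (he ▸ h1)
    simp [hne]
  · simp [h1]

theorem inv_preserve (ngrams used : List (String × String)) (idx : PySem.Dict String (List String))
    (cur b : String) (rest : List String)
    (hinv : inv ngrams used idx) (hcur : idx.getD cur [] = b :: rest) :
    inv ngrams (used ++ [(cur, b)]) (idx.insert cur rest) := by
  intro a
  have hfm : fm cur used (ddp ngrams PySem.Set.empty) = b :: rest := by
    rw [← hinv cur]; exact hcur
  rw [PySem.Dict.getD_insert]
  by_cases ha : a = cur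
  · rw [if_pos ha]; subst ha
    obtain ⟨l1, l2, hDeq, h1, h2, h3⟩ := fm_split a used _ _ _ hfm
    have hnd : (ddp ngrams PySem.Set.empty).Nodup := (ddp_nodup_notseen ngrams PySem.Set.empty).1
    rw [hDeq] at hnd
    have hnotl2 : (a, b) ∉ l2 :=
      (List.nodup_cons.mp (hnd.of_append_right)).1
    rw [hDeq]
    have e0 : fm a (used ++ [(a, b)]) (l1 ++ (a, b) :: l2) =
        fm a (used ++ [(a, b)]) l1 ++ fm a (used ++ [(a, b)]) ((a, b) :: l2) := by
      simp [fm]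
    have e1 : fm a (used ++ [(a, b)]) l1 = [] := fm_nil_grow a used (a, b) l1 h1
    have e2 : fm a (used ++ [(a, b)]) ((a, b) :: l2) = fm a (used ++ [(a, b)]) l2 := by
      simp only [fm, List.filterMap_cons]
      rw [if_neg (by simp)]
    have e3 : fm a (used ++ [(a, b)]) l2 = fm a used l2 := fm_notmem a used (a, b) l2 hnotl2
    rw [e0, e1, e2, e3, h3, List.nil_append]
  · rw [if_neg ha]
    rw [hinv a]
    exact (fm_nekey a used (cur, b) _ (fun h => ha h.symm)).symm

theorem bChain_nil (idx : PySem.Dict String (List String)) (cur : String)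
    (h : idx.getD cur [] = []) (k : Nat) : bChain k idx cur = [] := by
  cases k with
  | zero => simp [bChain]
  | succ n => simp [bChain, h]

theorem main_sim (ngrams : List (String × String)) :
    ∀ (k : Nat) (used : List (String × String)) (idx : PySem.Dict String (List String))
      (sent : List String) (cur : String), inv ngrams used idx →
      (aLoop ngrams k (sent ++ [cur], used)).1 = (sent ++ [cur]) ++ bChain k idx cur := by
  intro k
  induction k with
  | zero => intro used idx sent cur _; simp [aLoop, bChain]
  | succ k ih =>
    intro used idx sent cur hinv
    have hlast : (sent ++ [cur]).getLast? = some cur := List.getLast?_concat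
    have hfun : fUn cur used ngrams =
        (fm cur used (ddp ngrams PySem.Set.empty)).head?.map (fun b => (cur, b)) := by
      rw [← fUn_ddp_empty, fUn_eq_fm_head]
    have estep : aLoop ngrams (k + 1) (sent ++ [cur], used) =
        aLoop ngrams k (aStep ngrams (sent ++ [cur], used)) := by
      simp only [aLoop]
    rw [estep]
    cases h : idx.getD cur [] with
    | nil =>
      have hfm : fm cur used (ddp ngrams PySem.Set.empty) = [] := by rw [← hinv cur]; exact h
      have e1 : aStep ngrams (sent ++ [cur], used) = (sent ++ [cur], used) := by
        simp only [aStep, hlast, Option.getD_some, hfun, hfm, List.head?_nil, Option.map_none]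
      rw [e1, ih used idx sent cur hinv, bChain_nil idx cur h k, bChain_nil idx cur h (k + 1)]
    | cons b rest =>
      have hfm : fm cur used (ddp ngrams PySem.Set.empty) = b :: rest := by
        rw [← hinv cur]; exact h
      have e1 : aStep ngrams (sent ++ [cur], used) =
          ((sent ++ [cur]) ++ [b], used ++ [(cur, b)]) := by
        simp only [aStep, hlast, Option.getD_some, hfun, hfm, List.head?_cons, Option.map_some]
      have e2 : bChain (k + 1) idx cur = b :: bChain k (idx.insert cur rest) b := by
        simp only [bChain, h]
      rw [e1, e2, ih (used ++ [(cur, b)]) (idx.insert cur rest) (sent ++ [cur]) b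
        (inv_preserve ngrams used idx cur b rest hinv h)]
      simp

-- ===== VERDICT (by name: the statement is the Claim_ definition above) =====
theorem reconstruct_text_spec : Claim_equal_reconstruct_text := by
  intro ngrams _ hpre
  show reconstruct_text ngrams = reconstruct_text_alt ngrams
  match ngrams with
  | [] => exact absurd rfl hpre
  | (a0, b0) :: tl =>
    simp only [reconstruct_text, reconstruct_text_alt]
    have h := main_sim ((a0, b0) :: tl) (((a0, b0) :: tl).length) []
      (bIndex ((a0, b0) :: tl) PySem.Set.empty PySem.Dict.empty) [] a0
      (inv_init ((a0, b0) :: tl))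
    simpa using h
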